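-- pv_equiv track=rewrite | github.com/AltoPelago/aeon | implementations/python/src/aeon/cli.py | flag_values
-- ===== SOURCE A (Python) =====
-- def flag_values(args: list[str], flag: str) -> list[str]:
--     values: list[str] = []
--     index = 0
--     while index < len(args):
--         if args[index] == flag and index + 1 < len(args):
--             values.append(args[index + 1])
--             index += 2
--             continue
--         index += 1
--     return values
-- ===== SOURCE B (Python) =====
-- def flag_values(args: list[str], flag: str) -> list[str]:
--     values: list[str] = []
--     take_next = False
--     for a in args:
--         if take_next:
--             values.append(a)
--             take_next = False
--         elif a == flag:
--             take_next = True
--     return values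
-- ===== Notes on version B (the rewrite author's own statement) =====
-- stated objective: simpler
-- what changed: Replaces the while-loop with manual index arithmetic and lookahead (index+1, index+=2/continue) by a plain forward for-loop state machine carrying a take_next boolean; no indexing at all.
import Mathlib
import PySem

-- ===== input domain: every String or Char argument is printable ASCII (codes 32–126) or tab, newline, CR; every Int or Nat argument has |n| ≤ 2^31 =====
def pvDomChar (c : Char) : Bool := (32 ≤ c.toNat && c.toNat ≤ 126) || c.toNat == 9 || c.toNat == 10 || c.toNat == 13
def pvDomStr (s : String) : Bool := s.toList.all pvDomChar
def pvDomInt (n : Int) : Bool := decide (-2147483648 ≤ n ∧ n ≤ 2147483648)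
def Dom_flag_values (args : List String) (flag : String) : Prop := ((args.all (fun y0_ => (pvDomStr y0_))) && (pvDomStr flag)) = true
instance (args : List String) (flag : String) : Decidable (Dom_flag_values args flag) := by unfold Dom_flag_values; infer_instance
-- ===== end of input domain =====

-- B: forward state-machine fold with a take_next boolean instead of A's indexed while-loop with lookahead; same return value.
-- ===== PORT A =====
-- A's while loop: condition args[index]==flag ∧ index+1<len appends args[index+1] and skips 2, else skips 1;
-- transliterated as structural recursion on the remaining suffix of args.
def flag_values (args : List String) (flag : String) : List String :=
  match args with
  | a :: b :: rest =>
      if a == flag then b :: flag_values rest flag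
      else flag_values (b :: rest) flag
  | _ => []

-- ===== PORT B =====
def pvStepB (flag : String) (st : List String × Bool) (a : String) : List String × Bool :=
  if st.2 then (st.1 ++ [a], false)
  else if a == flag then (st.1, true)
  else (st.1, false)

def flag_values_alt (args : List String) (flag : String) : List String :=
  (args.foldl (pvStepB flag) ([], false)).1

-- ===== PRECONDITION & SPEC =====
def Spec_flag_values (args : List String) (flag : String) (out : List String) : Prop := out = flag_values_alt args flag
instance (args : List String) (flag : String) (out : List String) : Decidable (Spec_flag_values args flag out) := by unfold Spec_flag_values; infer_instance

-- ===== CLAIM (what is proved, stated in full; the proofs are below) =====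
def Claim_equal_flag_values : Prop := ∀ (args : List String) (flag : String), Dom_flag_values args flag → Spec_flag_values args flag (flag_values args flag)

-- ===== LEMMAS AND PROOFS =====
theorem pvStep_true (flag a : String) (acc : List String) :
    pvStepB flag (acc, true) a = (acc ++ [a], false) := rfl

theorem pvStep_false (flag a : String) (acc : List String) :
    pvStepB flag (acc, false) a = if a == flag then (acc, true) else (acc, false) := rfl

theorem pvFold_acc (flag : String) (xs : List String) (acc : List String) (b : Bool) :
    (xs.foldl (pvStepB flag) (acc, b)).1 = acc ++ (xs.foldl (pvStepB flag) ([], b)).1 := by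
  induction xs generalizing acc b with
  | nil => simp
  | cons a xs ih =>
    cases b with
    | true =>
      simp only [List.foldl_cons, pvStep_true, List.nil_append]
      rw [ih (acc ++ [a]) false, ih [a] false, List.append_assoc]
    | false =>
      simp only [List.foldl_cons, pvStep_false]
      by_cases hf : a == flag
      · simp only [if_pos hf]
        exact ih acc true
      · simp only [if_neg hf]
        exact ih acc false

theorem pvB_cons_false (flag a : String) (rest : List String) :
    ((a :: rest).foldl (pvStepB flag) ([], false)).1 =
      if a == flag then (rest.foldl (pvStepB flag) ([], true)).1
      else (rest.foldl (pvStepB flag) ([], false)).1 := by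
  simp only [List.foldl_cons, pvStep_false]
  by_cases hf : a == flag
  · simp only [if_pos hf]
  · simp only [if_neg hf]

theorem pvAB (args : List String) (flag : String) :
    flag_values args flag = (args.foldl (pvStepB flag) ([], false)).1 := by
  induction args using flag_values.induct flag with
  | case1 a b rest hf ih =>
    rw [flag_values, if_pos hf, ih]
    have h1 : pvStepB flag ([], false) a = ([], true) := by simp [pvStepB, hf]
    rw [List.foldl_cons, List.foldl_cons, h1, pvStep_true,
       pvFold_acc flag rest ([] ++ [b]) false]
    simp
  | case2 a b rest hf ih =>
    rw [flag_values, if_neg hf, ih]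
    have h1 : pvStepB flag ([], false) a = ([], false) := by simp [pvStepB, hf]
    conv_rhs => rw [List.foldl_cons, h1]
  | case3 xs h =>
    cases xs with
    | nil => rfl
    | cons a rest =>
      cases rest with
      | cons b r => exact absurd rfl (h a b r)
      | nil =>
        show [] = _
        rw [pvB_cons_false]
        by_cases hf : a == flag
        · rw [if_pos hf]; rfl
        · rw [if_neg hf]; rfl

-- ===== VERDICT (by name: the statement is the Claim_ definition above) =====
theorem flag_values_spec : Claim_equal_flag_values := by
  intro args flag _
  unfold Spec_flag_values flag_values_alt
  exact pvAB args flag
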